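-- pv_equiv track=rewrite | github.com/SrMilk24/IP2024.2 | lista_05/l05_q04.py | formata_senha
-- ===== SOURCE A (Python) =====
-- def formata_senha(lista):
--     senha = ""
--     for num in lista:
--         num_str = str(abs(num))
--         for digito in num_str:
--             if digito != '0':
--                 senha += digito
--     return senha
-- ===== SOURCE B (Python) =====
-- def formata_senha(lista):
--     partes = []
--     for num in lista:
--         n = abs(num)
--         chunk = []
--         while n > 0:
--             n, d = divmod(n, 10)
--             if d != 0:
--                 chunk.append(chr(ord('0') + d))
--         chunk.reverse()
--         partes.append(''.join(chunk))
--     return ''.join(partes)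
-- ===== Notes on version B (the rewrite author's own statement) =====
-- stated objective: alternative
-- what changed: B never converts numbers to strings: it extracts digits arithmetically with divmod(n, 10), collecting nonzero digits least-significant-first and reversing, instead of A's per-character scan of str(abs(num)) with string +=.
import Mathlib
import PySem

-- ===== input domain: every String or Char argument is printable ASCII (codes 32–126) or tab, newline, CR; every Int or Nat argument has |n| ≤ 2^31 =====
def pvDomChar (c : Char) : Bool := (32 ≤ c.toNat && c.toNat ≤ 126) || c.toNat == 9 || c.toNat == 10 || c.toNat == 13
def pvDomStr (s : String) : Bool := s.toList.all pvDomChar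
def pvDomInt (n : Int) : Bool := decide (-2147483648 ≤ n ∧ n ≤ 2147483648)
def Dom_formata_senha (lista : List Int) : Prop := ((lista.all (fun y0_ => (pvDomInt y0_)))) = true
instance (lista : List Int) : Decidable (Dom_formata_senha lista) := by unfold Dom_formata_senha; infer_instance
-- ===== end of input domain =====

-- B extracts the digits arithmetically with divmod instead of scanning str(abs(num)) character
-- by character: a different algorithm of similar cost (no speed claim).

-- ===== PORT A =====
-- senha accumulated as a List Char (Python string concatenation), converted to String at the end
def formata_senha (lista : List Int) : String :=
  String.ofList <|
    lista.foldl (fun senha num =>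
      let num_str := PySem.Int.toChars ((num.natAbs : Int))   -- str(abs(num))
      num_str.foldl (fun s digito =>
        if digito != '0' then s ++ [digito] else s) senha) []

-- ===== PORT B =====
-- the while-loop of Source B: collect the nonzero digits of n least-significant first,
-- via n, d = divmod(n, 10) and chr(ord('0') + d)
def fsChunk (n : Nat) : List Char :=
  if h : n = 0 then []
  else if n % 10 = 0 then fsChunk (n / 10)
  else Char.ofNat (48 + n % 10) :: fsChunk (n / 10)
termination_by n
decreasing_by all_goals exact Nat.div_lt_self (Nat.pos_of_ne_zero h) (by norm_num)

def formata_senha_alt (lista : List Int) : String :=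
  PySem.Str.join "" (lista.map (fun num => String.ofList (fsChunk num.natAbs).reverse))

-- ===== PRECONDITION & SPEC =====
def Spec_formata_senha (lista : List Int) (out : String) : Prop := out = formata_senha_alt lista
instance (lista : List Int) (out : String) : Decidable (Spec_formata_senha lista out) := by unfold Spec_formata_senha; infer_instance

-- ===== CLAIM =====
def Claim_equal_formata_senha : Prop := ∀ (lista : List Int), Dom_formata_senha lista → Spec_formata_senha lista (formata_senha lista)

-- ===== LEMMAS AND PROOFS =====

-- full decimal digit list of n, most significant first ([] for 0); proof-only helper
def fsAllDigits (n : Nat) : List Char :=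
  if h : n = 0 then []
  else fsAllDigits (n / 10) ++ [Nat.digitChar (n % 10)]
termination_by n
decreasing_by exact Nat.div_lt_self (Nat.pos_of_ne_zero h) (by norm_num)

theorem toDigitsCore_eq (n : Nat) : ∀ (fuel : Nat) (ds : List Char), n ≤ fuel →
    Nat.toDigitsCore 10 (fuel + 1) n ds
      = (if n = 0 then ['0'] else fsAllDigits n) ++ ds := by
  induction n using Nat.strong_induction_on with
  | _ n ih =>
    intro fuel ds hle
    by_cases h0 : n = 0
    · subst h0; simp [Nat.toDigitsCore, Nat.digitChar]
    · rw [Nat.toDigitsCore]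
      simp only [if_neg h0]
      by_cases hq : n / 10 = 0
      · simp only [hq]
        conv_rhs => rw [fsAllDigits, dif_neg h0, fsAllDigits, dif_pos hq]
        simp
      · simp only [if_neg hq]
        have hn10 : 10 ≤ n := by
          by_contra hlt
          exact hq (Nat.div_eq_of_lt (by omega))
        obtain ⟨fuel', rfl⟩ : ∃ f, fuel = f + 1 := ⟨fuel - 1, by omega⟩
        have hrec : n / 10 ≤ fuel' := by
          have := Nat.div_le_self n 10
          have h2 : n / 10 < n := Nat.div_lt_self (Nat.pos_of_ne_zero h0) (by norm_num)
          omega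
        rw [ih (n / 10) (Nat.div_lt_self (Nat.pos_of_ne_zero h0) (by norm_num)) fuel' _ hrec]
        rw [if_neg hq]
        conv_rhs => rw [fsAllDigits, dif_neg h0]
        simp

theorem toDigits_eq (n : Nat) :
    Nat.toDigits 10 n = if n = 0 then ['0'] else fsAllDigits n := by
  have := toDigitsCore_eq n n [] le_rfl
  simpa [Nat.toDigits] using this

theorem digitChar_eq_ofNat (d : Nat) (hd : d < 10) :
    Nat.digitChar d = Char.ofNat (48 + d) := by
  interval_cases d <;> decide

theorem digitChar_ne_zero_iff (d : Nat) (hd : d < 10) :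
    (Nat.digitChar d != '0') = (decide (d ≠ 0)) := by
  interval_cases d <;> decide

theorem fsAllDigits_filter (n : Nat) :
    (fsAllDigits n).filter (fun c => c != '0') = (fsChunk n).reverse := by
  induction n using Nat.strong_induction_on with
  | _ n ih =>
    by_cases h0 : n = 0
    · subst h0; rw [fsAllDigits, fsChunk]; simp
    · rw [fsAllDigits, dif_neg h0, fsChunk, dif_neg h0]
      have hlt : n / 10 < n := Nat.div_lt_self (Nat.pos_of_ne_zero h0) (by norm_num)
      have hmod : n % 10 < 10 := Nat.mod_lt _ (by norm_num)
      rw [List.filter_append, ih (n / 10) hlt]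
      by_cases hm : n % 10 = 0
      · simp [hm, List.filter, Nat.digitChar]
      · simp only [if_neg hm, List.reverse_cons, List.filter]
        rw [digitChar_ne_zero_iff _ hmod]
        simp [hm, digitChar_eq_ofNat _ hmod]

theorem toDigits_filter (n : Nat) :
    (Nat.toDigits 10 n).filter (fun c => c != '0') = (fsChunk n).reverse := by
  rw [toDigits_eq]
  by_cases h0 : n = 0
  · subst h0; rw [fsChunk]; simp
  · rw [if_neg h0, fsAllDigits_filter]

theorem intercalate_nil_chars (l : List (List Char)) : List.intercalate [] l = l.flatten := by
  induction l with
  | nil => simp [List.intercalate]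
  | cons a t ih =>
    cases t with
    | nil => simp [List.intercalate]
    | cons b u =>
      simp only [List.intercalate, List.intersperse] at *
      simp_all

theorem formata_senha_eq_alt (lista : List Int) :
    formata_senha lista = formata_senha_alt lista := by
  -- A as a flatMap of per-number filtered digit lists
  have hA : formata_senha lista
      = String.ofList (lista.flatMap
          (fun num => (PySem.Int.toChars ((num.natAbs : Int))).filter (fun d => d != '0'))) := by
    unfold formata_senha
    have step : (fun (senha : List Char) (num : Int) =>
        let num_str := PySem.Int.toChars ((num.natAbs : Int))
        num_str.foldl (fun s digito => if digito != '0' then s ++ [digito] else s) senha)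
      = fun senha num =>
        senha ++ (PySem.Int.toChars ((num.natAbs : Int))).filter (fun d => d != '0') := by
      funext senha num
      simpa using PySem.List.foldl_append_if (fun d => d != '0') id
        (PySem.Int.toChars ((num.natAbs : Int))) senha
    rw [step, PySem.List.foldl_append_eq_flatMap]
    simp
  -- B's character list is the concatenation of the reversed chunks
  have hB : (formata_senha_alt lista).toList
      = lista.flatMap (fun num => (fsChunk num.natAbs).reverse) := by
    unfold formata_senha_alt
    simp only [PySem.Str.join, String.toList_ofList, PySem.Chars.join, List.map_map]
    have he : ("" : String).toList = ([] : List Char) := rfl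
    rw [he, intercalate_nil_chars]
    simp [Function.comp_def, List.flatMap_def]
  have hchars : ∀ num : Int,
      (PySem.Int.toChars ((num.natAbs : Int))).filter (fun d => d != '0')
        = (fsChunk num.natAbs).reverse := by
    intro num
    have : PySem.Int.toChars ((num.natAbs : Int)) = Nat.toDigits 10 num.natAbs := by
      simp only [PySem.Int.toChars]
      rw [if_neg (by exact not_lt.mpr (Int.natCast_nonneg _)), Int.toNat_natCast]
    rw [this, toDigits_filter]
  calc formata_senha lista
      = String.ofList (lista.flatMap
          (fun num => (PySem.Int.toChars ((num.natAbs : Int))).filter (fun d => d != '0'))) := hA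
    _ = String.ofList ((formata_senha_alt lista).toList) := by
          rw [hB]; congr 1; exact List.flatMap_congr (fun num _ => hchars num)
    _ = formata_senha_alt lista := String.ofList_toList

-- ===== VERDICT =====
theorem formata_senha_spec : Claim_equal_formata_senha := by
  intro lista _
  exact formata_senha_eq_alt lista
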